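-- pv_equiv track=rewrite | github.com/yaronlev9/Corona_apocalypse | multi_agents.py | wall_between_points
-- ===== SOURCE A (Python) =====
-- def wall_between_points(first_point, second_point, board):
--     """
--     checks if there are walls between two points on the board.
--     """
--     horizontal_dist = abs(first_point[1] - second_point[1])
--     vertical_dist = abs(first_point[0] - second_point[0])
--     min_horizontal = min(first_point[1], second_point[1])
--     min_vertical = min(first_point[0], second_point[0])
--     for j in range(vertical_dist + 1):
--         for i in range(horizontal_dist - 1):
--             if board[min_vertical + j][min_horizontal + i + 1] == '*':
--                 return True
--     for i in range(horizontal_dist + 1):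
--         for j in range(vertical_dist - 1):
--             if board[min_vertical + j + 1][min_horizontal + i] == '*':
--                 return True
--     return False
-- ===== SOURCE B (Python) =====
-- def wall_between_points(first_point, second_point, board):
--     """
--     checks if there are walls between two points on the board.
--     """
--     min_row = min(first_point[0], second_point[0])
--     max_row = max(first_point[0], second_point[0])
--     min_col = min(first_point[1], second_point[1])
--     max_col = max(first_point[1], second_point[1])
--     between = [board[r][c]
--                for r in range(min_row, max_row + 1)
--                for c in range(min_col, max_col + 1)
--                if not (r in (min_row, max_row) and c in (min_col, max_col))]
--     return '*' in between
-- ===== Notes on version B (the rewrite author's own statement) =====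
-- stated objective: idiomatic
-- what changed: A's two overlapping differently-shaped nested loops (interior columns over all rows, then all columns over interior rows) are replaced by one comprehension collecting every cell of the bounding rectangle except its four corners - the exact union of A's two scan regions - followed by a single '*' in membership test.
-- outside the precondition, e.g. on wall_between_points((0, -3), (2, -1), [['.', '.'], ['.', '.'], ['*', '.']]): A returns True, B raises IndexError
import Mathlib
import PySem

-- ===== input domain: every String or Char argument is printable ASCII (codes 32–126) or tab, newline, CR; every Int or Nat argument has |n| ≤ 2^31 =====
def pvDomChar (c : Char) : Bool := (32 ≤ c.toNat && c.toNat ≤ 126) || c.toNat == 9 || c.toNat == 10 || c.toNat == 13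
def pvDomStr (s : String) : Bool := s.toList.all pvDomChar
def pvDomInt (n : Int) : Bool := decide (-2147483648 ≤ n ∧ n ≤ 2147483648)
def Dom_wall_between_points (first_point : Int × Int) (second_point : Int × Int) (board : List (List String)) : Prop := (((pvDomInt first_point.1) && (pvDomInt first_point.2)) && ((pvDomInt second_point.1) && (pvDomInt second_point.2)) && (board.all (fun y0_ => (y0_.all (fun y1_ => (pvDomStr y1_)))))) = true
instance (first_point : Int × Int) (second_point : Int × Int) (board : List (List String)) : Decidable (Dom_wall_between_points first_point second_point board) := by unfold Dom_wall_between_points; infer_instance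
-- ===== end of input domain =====

-- B replaces A's two overlapping nested loops by one comprehension collecting every
-- cell of the bounding rectangle except its four corners, then a single membership
-- test (objective: idiomatic, same cost).

-- board[r][c] with Python index semantics (negative wrap; none = IndexError, excluded
-- by Pre_, where the .getD "" default is never reached)
def pvCell (board : List (List String)) (r c : Int) : String :=
  ((PySem.List.pyGet? board r).bind (fun row => PySem.List.pyGet? row c)).getD ""

-- ===== PORT A =====
def wall_between_points (first_point : Int × Int) (second_point : Int × Int) (board : List (List String)) : Bool :=
  let horizontal_dist : Int := |first_point.2 - second_point.2|
  let vertical_dist : Int := |first_point.1 - second_point.1|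
  let min_horizontal : Int := min first_point.2 second_point.2
  let min_vertical : Int := min first_point.1 second_point.1
  ((PySem.List.pyRange 0 (vertical_dist + 1) 1).any (fun j =>
      (PySem.List.pyRange 0 (horizontal_dist - 1) 1).any (fun i =>
        pvCell board (min_vertical + j) (min_horizontal + i + 1) == "*"))) ||
  ((PySem.List.pyRange 0 (horizontal_dist + 1) 1).any (fun i =>
      (PySem.List.pyRange 0 (vertical_dist - 1) 1).any (fun j =>
        pvCell board (min_vertical + j + 1) (min_horizontal + i) == "*")))

-- ===== PORT B =====
def wall_between_points_alt (first_point : Int × Int) (second_point : Int × Int) (board : List (List String)) : Bool :=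
  let min_row : Int := min first_point.1 second_point.1
  let max_row : Int := max first_point.1 second_point.1
  let min_col : Int := min first_point.2 second_point.2
  let max_col : Int := max first_point.2 second_point.2
  let between : List String :=
    (PySem.List.pyRange min_row (max_row + 1) 1).flatMap (fun r =>
      ((PySem.List.pyRange min_col (max_col + 1) 1).filter (fun c =>
        !((r == min_row || r == max_row) && (c == min_col || c == max_col)))).map
        (fun c => pvCell board r c))
  between.contains "*"

-- ===== PRECONDITION & SPEC =====
-- Pre_ holds exactly when every cell strictly between the two points (the bounding
-- rectangle minus its four corners — the exact union of the cells A's two loops read)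
-- resolves under Python indexing (negative wrap allowed).  Outside it both programs
-- raise IndexError on the cells they reach — except that A, scanning cell by cell with
-- an early return, can still return True when it meets a wall before its first
-- unreadable cell, while B, which collects all the cells before testing, raises there
-- (see claim cites).
def Pre_wall_between_points (first_point : Int × Int) (second_point : Int × Int) (board : List (List String)) : Prop :=
  let hd : Int := |first_point.2 - second_point.2|
  let vd : Int := |first_point.1 - second_point.1|
  let mh : Int := min first_point.2 second_point.2
  let mv : Int := min first_point.1 second_point.1
  let L : Int := (board.length : Int)
  (2 ≤ hd → -L ≤ mv ∧ mv + vd < L) ∧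
  (hd < 2 ∧ 2 ≤ vd → -L ≤ mv + 1 ∧ mv + vd - 1 < L) ∧
  (∀ p ∈ board.zipIdx,
    (2 ≤ hd ∧ ((mv ≤ (p.2 : Int) ∧ (p.2 : Int) ≤ mv + vd) ∨ (mv ≤ (p.2 : Int) - L ∧ (p.2 : Int) - L ≤ mv + vd)) →
      -((p.1.length : Int)) ≤ mh + 1 ∧ mh + hd - 1 < (p.1.length : Int)) ∧
    (2 ≤ vd ∧ ((mv + 1 ≤ (p.2 : Int) ∧ (p.2 : Int) ≤ mv + vd - 1) ∨ (mv + 1 ≤ (p.2 : Int) - L ∧ (p.2 : Int) - L ≤ mv + vd - 1)) →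
      -((p.1.length : Int)) ≤ mh ∧ mh + hd < (p.1.length : Int)))
instance (first_point : Int × Int) (second_point : Int × Int) (board : List (List String)) : Decidable (Pre_wall_between_points first_point second_point board) := by unfold Pre_wall_between_points; infer_instance

def pvWitness_wall_between_points : (Int × Int) × (Int × Int) × List (List String) :=
  ((0, 0), (2, 2), [[".", "*", "."], [".", ".", "."], [".", ".", "."]])

def Spec_wall_between_points (first_point : Int × Int) (second_point : Int × Int) (board : List (List String)) (out : Bool) : Prop := out = wall_between_points_alt first_point second_point board
instance (first_point : Int × Int) (second_point : Int × Int) (board : List (List String)) (out : Bool) : Decidable (Spec_wall_between_points first_point second_point board out) := by unfold Spec_wall_between_points; infer_instance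

-- ===== CLAIM (what is proved, stated in full; the proofs are below) =====
def Claim_equal_wall_between_points : Prop := ∀ (first_point : Int × Int) (second_point : Int × Int) (board : List (List String)), Dom_wall_between_points first_point second_point board → Pre_wall_between_points first_point second_point board → Spec_wall_between_points first_point second_point board (wall_between_points first_point second_point board)

-- ===== LEMMAS AND PROOFS =====

-- the two scan regions of A together are exactly B's rectangle minus its four corners;
-- the proof is an index-set argument, independent of the board, so the (total) Lean
-- ports are equal even without the Pre_ hypothesis.
theorem wall_eq_wall_alt (first_point : Int × Int) (second_point : Int × Int)
    (board : List (List String)) :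
    wall_between_points first_point second_point board =
      wall_between_points_alt first_point second_point board := by
  obtain ⟨a, b⟩ := first_point
  obtain ⟨c, d⟩ := second_point
  simp only [wall_between_points, wall_between_points_alt]
  rw [Bool.eq_iff_iff]
  simp only [List.contains_eq_any_beq, List.any_flatMap, List.any_map, List.any_filter,
    Function.comp, Bool.or_eq_true, List.any_eq_true, PySem.List.mem_pyRange_one,
    Bool.and_eq_true, Bool.not_eq_true', Bool.and_eq_false_iff, Bool.or_eq_false_iff,
    beq_iff_eq, beq_eq_false_iff_ne, ne_eq, Int.abs_eq_natAbs]
  constructor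
  · rintro (⟨j, ⟨hj0, hj1⟩, i, ⟨hi0, hi1⟩, hc⟩ | ⟨i, ⟨hi0, hi1⟩, j, ⟨hj0, hj1⟩, hc⟩)
    · refine ⟨min a c + j, by omega, min b d + i + 1, by omega, ?_, hc.symm⟩
      omega
    · refine ⟨min a c + j + 1, by omega, min b d + i, by omega, ?_, hc.symm⟩
      omega
  · rintro ⟨r, hr, c', hc', hnc, hcell⟩
    by_cases hcol : min b d + 1 ≤ c' ∧ c' ≤ min b d + ((b - d).natAbs : Int) - 1
    · left
      refine ⟨r - min a c, by omega, c' - min b d - 1, by omega, ?_⟩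
      rw [show min a c + (r - min a c) = r by omega,
          show min b d + (c' - min b d - 1) + 1 = c' by omega]
      exact hcell.symm
    · right
      refine ⟨c' - min b d, by omega, r - min a c - 1, by omega, ?_⟩
      rw [show min a c + (r - min a c - 1) + 1 = r by omega,
          show min b d + (c' - min b d) = c' by omega]
      exact hcell.symm

-- ===== VERDICT (by name: the statement is the Claim_ definition above) =====
theorem wall_between_points_spec : Claim_equal_wall_between_points := by
  intro first_point second_point board _ _
  unfold Spec_wall_between_points
  exact wall_eq_wall_alt first_point second_point board
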